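-- pv_equiv track=rewrite | github.com/owenwebDe/filghtbooking- | backend/app/services/flight_api.py | _categorize_fare_rule
-- ===== SOURCE A (Python) =====
-- def _categorize_fare_rule(category: str) -> str:
--     """
--     Categorize fare rule types for better organization
--     """
--     if not category:
--         return "general"
--
--     category_lower = category.lower()
--
--     if any(word in category_lower for word in ["eligibility", "passenger"]):
--         return "eligibility"
--     elif any(word in category_lower for word in ["day", "time", "seasonal"]):
--         return "travel_dates"
--     elif any(word in category_lower for word in ["advance", "purchase", "payment"]):
--         return "booking_requirements"
--     elif any(word in category_lower for word in ["stay", "duration", "minimum", "maximum"]):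
--         return "stay_requirements"
--     elif any(word in category_lower for word in ["change", "modification", "reissue"]):
--         return "changes"
--     elif any(word in category_lower for word in ["refund", "cancel", "void"]):
--         return "cancellation"
--     elif any(word in category_lower for word in ["baggage", "luggage"]):
--         return "baggage"
--     elif any(word in category_lower for word in ["penalty", "fee", "charge"]):
--         return "penalties"
--     else:
--         return "general"
-- ===== SOURCE B (Python) =====
-- LABELS = [
--     "eligibility",
--     "travel_dates",
--     "booking_requirements",
--     "stay_requirements",
--     "changes",
--     "cancellation",
--     "baggage",
--     "penalties",
-- ]
--
-- KEYWORD_PRIORITY = {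
--     "eligibility": 0, "passenger": 0,
--     "day": 1, "time": 1, "seasonal": 1,
--     "advance": 2, "purchase": 2, "payment": 2,
--     "stay": 3, "duration": 3, "minimum": 3, "maximum": 3,
--     "change": 4, "modification": 4, "reissue": 4,
--     "refund": 5, "cancel": 5, "void": 5,
--     "baggage": 6, "luggage": 6,
--     "penalty": 7, "fee": 7, "charge": 7,
-- }
--
--
-- def _categorize_fare_rule(category: str) -> str:
--     # Single left-to-right scan of the lowered text: at each position check which
--     # keyword starts there and keep the smallest (highest-priority) label index.
--     text = category.lower()
--     best = len(LABELS)
--     for i in range(len(text)):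
--         for kw, pri in KEYWORD_PRIORITY.items():
--             if pri < best and text.startswith(kw, i):
--                 best = pri
--     return LABELS[best] if best < len(LABELS) else "general"
-- ===== Notes on version B (the rewrite author's own statement) =====
-- stated objective: alternative
-- what changed: Instead of testing each category's keyword list for substring membership in priority order, B makes a single left-to-right scan of the lowered text, checking at every position which keyword from a keyword->priority dict starts there and keeping the minimum matched priority, then maps that index to its label.
import Mathlib
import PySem

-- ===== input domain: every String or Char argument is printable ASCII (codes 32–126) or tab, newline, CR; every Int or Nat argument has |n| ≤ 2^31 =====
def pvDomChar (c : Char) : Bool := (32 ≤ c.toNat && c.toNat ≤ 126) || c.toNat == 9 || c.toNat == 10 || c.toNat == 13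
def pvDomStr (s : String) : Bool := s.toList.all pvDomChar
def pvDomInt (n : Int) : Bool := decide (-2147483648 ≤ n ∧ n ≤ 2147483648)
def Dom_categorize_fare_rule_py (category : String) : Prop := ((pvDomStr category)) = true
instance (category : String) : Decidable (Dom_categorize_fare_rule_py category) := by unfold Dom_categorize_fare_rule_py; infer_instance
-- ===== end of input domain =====

-- B replaces A's eight-branch keyword-chain by a single left-to-right scan of the lowered text keeping the minimum matched label index (inverted loop order); alternative decomposition, same cost.

-- ===== PORT A =====
def categorize_fare_rule_py (category : String) : String :=
  if category = "" then "general"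
  else
    let category_lower := PySem.Str.lower category
    if ["eligibility", "passenger"].any (fun word => PySem.Str.isIn word category_lower) then "eligibility"
    else if ["day", "time", "seasonal"].any (fun word => PySem.Str.isIn word category_lower) then "travel_dates"
    else if ["advance", "purchase", "payment"].any (fun word => PySem.Str.isIn word category_lower) then "booking_requirements"
    else if ["stay", "duration", "minimum", "maximum"].any (fun word => PySem.Str.isIn word category_lower) then "stay_requirements"
    else if ["change", "modification", "reissue"].any (fun word => PySem.Str.isIn word category_lower) then "changes"
    else if ["refund", "cancel", "void"].any (fun word => PySem.Str.isIn word category_lower) then "cancellation"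
    else if ["baggage", "luggage"].any (fun word => PySem.Str.isIn word category_lower) then "baggage"
    else if ["penalty", "fee", "charge"].any (fun word => PySem.Str.isIn word category_lower) then "penalties"
    else "general"

-- ===== PORT B =====
def pvLABELS : List String := ["eligibility", "travel_dates", "booking_requirements", "stay_requirements", "changes", "cancellation", "baggage", "penalties"]

-- the KEYWORD_PRIORITY dict: association list in insertion order (all keys distinct)
def pvPRI : List (String × Int) :=
  [("eligibility", 0),
   ("passenger", 0),
   ("day", 1),
   ("time", 1),
   ("seasonal", 1),
   ("advance", 2),
   ("purchase", 2),
   ("payment", 2),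
   ("stay", 3),
   ("duration", 3),
   ("minimum", 3),
   ("maximum", 3),
   ("change", 4),
   ("modification", 4),
   ("reissue", 4),
   ("refund", 5),
   ("cancel", 5),
   ("void", 5),
   ("baggage", 6),
   ("luggage", 6),
   ("penalty", 7),
   ("fee", 7),
   ("charge", 7)]

def categorize_fare_rule_py_alt (category : String) : String :=
  let text : List Char := (PySem.Str.lower category).toList
  let best : Int :=
    (PySem.List.pyRange 0 (text.length : Int) 1).foldl
      (fun best i =>
        pvPRI.foldl
          (fun best kv =>
            -- text.startswith(kw, i) with 0 ≤ i < len(text): exact as a prefix test on text.drop i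
            if kv.2 < best ∧ PySem.Chars.startswith (text.drop i.toNat) kv.1.toList then kv.2 else best)
          best)
      (pvLABELS.length : Int)
  if best < (pvLABELS.length : Int) then (PySem.List.pyGet? pvLABELS best).getD "general" else "general"

-- ===== PRECONDITION & SPEC =====
def Spec_categorize_fare_rule_py (category : String) (out : String) : Prop := out = categorize_fare_rule_py_alt category
instance (category : String) (out : String) : Decidable (Spec_categorize_fare_rule_py category out) := by unfold Spec_categorize_fare_rule_py; infer_instance

-- ===== CLAIM (what is proved, stated in full; the proofs are below) =====
def Claim_equal_categorize_fare_rule_py : Prop := ∀ (category : String), Dom_categorize_fare_rule_py category → Spec_categorize_fare_rule_py category (categorize_fare_rule_py category)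

-- ===== LEMMAS AND PROOFS =====

-- A's chain, abstracted over the eight group-match booleans
def chainG (g0 g1 g2 g3 g4 g5 g6 g7 : Bool) : String :=
  if g0 then "eligibility" else if g1 then "travel_dates" else if g2 then "booking_requirements"
  else if g3 then "stay_requirements" else if g4 then "changes" else if g5 then "cancellation"
  else if g6 then "baggage" else if g7 then "penalties" else "general"

def pvG0 (t : List Char) : Bool := ["eligibility", "passenger"].any (fun word => PySem.Chars.isIn word.toList t)
def pvG1 (t : List Char) : Bool := ["day", "time", "seasonal"].any (fun word => PySem.Chars.isIn word.toList t)
def pvG2 (t : List Char) : Bool := ["advance", "purchase", "payment"].any (fun word => PySem.Chars.isIn word.toList t)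
def pvG3 (t : List Char) : Bool := ["stay", "duration", "minimum", "maximum"].any (fun word => PySem.Chars.isIn word.toList t)
def pvG4 (t : List Char) : Bool := ["change", "modification", "reissue"].any (fun word => PySem.Chars.isIn word.toList t)
def pvG5 (t : List Char) : Bool := ["refund", "cancel", "void"].any (fun word => PySem.Chars.isIn word.toList t)
def pvG6 (t : List Char) : Bool := ["baggage", "luggage"].any (fun word => PySem.Chars.isIn word.toList t)
def pvG7 (t : List Char) : Bool := ["penalty", "fee", "charge"].any (fun word => PySem.Chars.isIn word.toList t)

-- B's inner loop over the keyword table, named for the proofs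
def pvFold (s : List Char) (L : List (String × Int)) (b : Int) : Int :=
  L.foldl (fun b kv => if kv.2 < b ∧ PySem.Chars.startswith s kv.1.toList = true then kv.2 else b) b

-- B's outer loop over the scan positions, named for the proofs
def pvOuter (t : List Char) (ps : List Int) (b : Int) : Int :=
  ps.foldl (fun b i => pvFold (t.drop i.toNat) pvPRI b) b

lemma pvFold_spec (s : List Char) : ∀ (L : List (String × Int)) (b : Int),
    pvFold s L b ≤ b ∧
    (∀ kv ∈ L, PySem.Chars.startswith s kv.1.toList = true → pvFold s L b ≤ kv.2) ∧
    (pvFold s L b = b ∨ ∃ kv ∈ L, PySem.Chars.startswith s kv.1.toList = true ∧ pvFold s L b = kv.2) := by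
  intro L
  induction L with
  | nil => intro b; simp [pvFold]
  | cons x L ih =>
    intro b
    have hstep : pvFold s (x :: L) b
        = pvFold s L (if x.2 < b ∧ PySem.Chars.startswith s x.1.toList = true then x.2 else b) := by
      simp [pvFold]
    obtain ⟨ih1, ih2, ih3⟩ := ih (if x.2 < b ∧ PySem.Chars.startswith s x.1.toList = true then x.2 else b)
    have hble : (if x.2 < b ∧ PySem.Chars.startswith s x.1.toList = true then x.2 else b) ≤ b := by
      split_ifs with h
      · exact le_of_lt h.1
      · exact le_rfl
    refine ⟨by rw [hstep]; exact le_trans ih1 hble, ?_, ?_⟩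
    · intro kv hm hsw
      rcases List.mem_cons.mp hm with rfl | hm'
      · rw [hstep]
        refine le_trans ih1 ?_
        split_ifs with h
        · exact le_rfl
        · have : ¬ kv.2 < b := fun hlt => h ⟨hlt, hsw⟩
          omega
      · rw [hstep]; exact ih2 kv hm' hsw
    · rw [hstep]
      rcases ih3 with h | ⟨kv, hm, hsw, hv⟩
      · rw [h]
        split_ifs with hcond
        · exact Or.inr ⟨x, List.mem_cons_self, hcond.2, rfl⟩
        · exact Or.inl rfl
      · exact Or.inr ⟨kv, List.mem_cons_of_mem _ hm, hsw, hv⟩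

lemma pvOuter_spec (t : List Char) : ∀ (ps : List Int) (b : Int),
    pvOuter t ps b ≤ b ∧
    (∀ kv ∈ pvPRI, (∃ i ∈ ps, PySem.Chars.startswith (t.drop i.toNat) kv.1.toList = true) → pvOuter t ps b ≤ kv.2) ∧
    (pvOuter t ps b = b ∨ ∃ kv ∈ pvPRI, (∃ i ∈ ps, PySem.Chars.startswith (t.drop i.toNat) kv.1.toList = true) ∧ pvOuter t ps b = kv.2) := by
  intro ps
  induction ps with
  | nil => intro b; simp [pvOuter]
  | cons i ps ih =>
    intro b
    have hstep : pvOuter t (i :: ps) b = pvOuter t ps (pvFold (t.drop i.toNat) pvPRI b) := by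
      simp [pvOuter]
    obtain ⟨f1, f2, f3⟩ := pvFold_spec (t.drop i.toNat) pvPRI b
    obtain ⟨o1, o2, o3⟩ := ih (pvFold (t.drop i.toNat) pvPRI b)
    refine ⟨by rw [hstep]; exact le_trans o1 f1, ?_, ?_⟩
    · rintro kv hm ⟨j, hj, hsw⟩
      rcases List.mem_cons.mp hj with rfl | hj'
      · rw [hstep]; exact le_trans o1 (f2 kv hm hsw)
      · rw [hstep]; exact o2 kv hm ⟨j, hj', hsw⟩
    · rw [hstep]
      rcases o3 with h | ⟨kv, hm, ⟨j, hj, hsw⟩, hv⟩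
      · rw [h]
        rcases f3 with h' | ⟨kv, hm, hsw, hv⟩
        · exact Or.inl h'
        · exact Or.inr ⟨kv, hm, ⟨i, List.mem_cons_self, hsw⟩, hv⟩
      · exact Or.inr ⟨kv, hm, ⟨j, List.mem_cons_of_mem _ hj, hsw⟩, hv⟩

-- a keyword occurs at some scan position iff it is a substring (keywords are nonempty)
lemma pvSw_iff (t : List Char) (kw : List Char) (hne : kw ≠ []) :
    (∃ i ∈ PySem.List.pyRange 0 (t.length : Int) 1,
        PySem.Chars.startswith (t.drop i.toNat) kw = true)
      ↔ PySem.Chars.isIn kw t = true := by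
  rw [← PySem.Chars.exists_prefix_drop_iff_isIn]
  constructor
  · rintro ⟨i, _, hsw⟩
    exact ⟨i.toNat, (PySem.Chars.startswith_iff _ _).mp hsw⟩
  · rintro ⟨j, hpre⟩
    have hj : j < t.length := by
      by_contra h
      push_neg at h
      rw [List.drop_eq_nil_of_le h] at hpre
      exact hne (List.prefix_nil.mp hpre)
    refine ⟨(j : Int), ?_, ?_⟩
    · rw [PySem.List.mem_pyRange_one]
      exact ⟨Int.natCast_nonneg j, by exact_mod_cast hj⟩
    · simpa using (PySem.Chars.startswith_iff _ _).mpr (by simpa using hpre)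

lemma pvChain (t : List Char) (r : Int)
    (hg0 : pvG0 t = true → r ≤ 0) (hg1 : pvG1 t = true → r ≤ 1) (hg2 : pvG2 t = true → r ≤ 2) (hg3 : pvG3 t = true → r ≤ 3) (hg4 : pvG4 t = true → r ≤ 4) (hg5 : pvG5 t = true → r ≤ 5) (hg6 : pvG6 t = true → r ≤ 6) (hg7 : pvG7 t = true → r ≤ 7)
    (hex : r = 8 ∨ (pvG0 t = true ∧ r = 0) ∨ (pvG1 t = true ∧ r = 1) ∨ (pvG2 t = true ∧ r = 2) ∨ (pvG3 t = true ∧ r = 3) ∨ (pvG4 t = true ∧ r = 4) ∨ (pvG5 t = true ∧ r = 5) ∨ (pvG6 t = true ∧ r = 6) ∨ (pvG7 t = true ∧ r = 7)) :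
    chainG (pvG0 t) (pvG1 t) (pvG2 t) (pvG3 t) (pvG4 t) (pvG5 t) (pvG6 t) (pvG7 t)
      = (if r < 8 then (PySem.List.pyGet? pvLABELS r).getD "general" else "general") := by
  have hl : 0 ≤ r := by
    rcases hex with h | ⟨_,h⟩ | ⟨_,h⟩ | ⟨_,h⟩ | ⟨_,h⟩ | ⟨_,h⟩ | ⟨_,h⟩ | ⟨_,h⟩ | ⟨_,h⟩ <;> omega
  have hu : r ≤ 8 := by
    rcases hex with h | ⟨_,h⟩ | ⟨_,h⟩ | ⟨_,h⟩ | ⟨_,h⟩ | ⟨_,h⟩ | ⟨_,h⟩ | ⟨_,h⟩ | ⟨_,h⟩ <;> omega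
  interval_cases r
  · -- r = 0
    have ht : pvG0 t = true := by
      rcases hex with h8 | ⟨hh0, he0⟩ | ⟨hh1, he1⟩ | ⟨hh2, he2⟩ | ⟨hh3, he3⟩ | ⟨hh4, he4⟩ | ⟨hh5, he5⟩ | ⟨hh6, he6⟩ | ⟨hh7, he7⟩
      · exact absurd h8 (by omega)
      · exact hh0
      · exact absurd he1 (by omega)
      · exact absurd he2 (by omega)
      · exact absurd he3 (by omega)
      · exact absurd he4 (by omega)
      · exact absurd he5 (by omega)
      · exact absurd he6 (by omega)
      · exact absurd he7 (by omega)
    norm_num [chainG, ht, pvLABELS, PySem.List.pyGet?, PySem.List.pyIdx?]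
  · -- r = 1
    have hf0 : pvG0 t = false := by
      cases h : pvG0 t with
      | false => rfl
      | true => exact absurd (hg0 h) (by omega)
    have ht : pvG1 t = true := by
      rcases hex with h8 | ⟨hh0, he0⟩ | ⟨hh1, he1⟩ | ⟨hh2, he2⟩ | ⟨hh3, he3⟩ | ⟨hh4, he4⟩ | ⟨hh5, he5⟩ | ⟨hh6, he6⟩ | ⟨hh7, he7⟩
      · exact absurd h8 (by omega)
      · exact absurd he0 (by omega)
      · exact hh1
      · exact absurd he2 (by omega)
      · exact absurd he3 (by omega)
      · exact absurd he4 (by omega)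
      · exact absurd he5 (by omega)
      · exact absurd he6 (by omega)
      · exact absurd he7 (by omega)
    norm_num [chainG, hf0, ht, pvLABELS, PySem.List.pyGet?, PySem.List.pyIdx?]
  · -- r = 2
    have hf0 : pvG0 t = false := by
      cases h : pvG0 t with
      | false => rfl
      | true => exact absurd (hg0 h) (by omega)
    have hf1 : pvG1 t = false := by
      cases h : pvG1 t with
      | false => rfl
      | true => exact absurd (hg1 h) (by omega)
    have ht : pvG2 t = true := by
      rcases hex with h8 | ⟨hh0, he0⟩ | ⟨hh1, he1⟩ | ⟨hh2, he2⟩ | ⟨hh3, he3⟩ | ⟨hh4, he4⟩ | ⟨hh5, he5⟩ | ⟨hh6, he6⟩ | ⟨hh7, he7⟩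
      · exact absurd h8 (by omega)
      · exact absurd he0 (by omega)
      · exact absurd he1 (by omega)
      · exact hh2
      · exact absurd he3 (by omega)
      · exact absurd he4 (by omega)
      · exact absurd he5 (by omega)
      · exact absurd he6 (by omega)
      · exact absurd he7 (by omega)
    norm_num [chainG, hf0, hf1, ht, pvLABELS, PySem.List.pyGet?, PySem.List.pyIdx?]
    all_goals decide
  · -- r = 3
    have hf0 : pvG0 t = false := by
      cases h : pvG0 t with
      | false => rfl
      | true => exact absurd (hg0 h) (by omega)
    have hf1 : pvG1 t = false := by
      cases h : pvG1 t with
      | false => rfl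
      | true => exact absurd (hg1 h) (by omega)
    have hf2 : pvG2 t = false := by
      cases h : pvG2 t with
      | false => rfl
      | true => exact absurd (hg2 h) (by omega)
    have ht : pvG3 t = true := by
      rcases hex with h8 | ⟨hh0, he0⟩ | ⟨hh1, he1⟩ | ⟨hh2, he2⟩ | ⟨hh3, he3⟩ | ⟨hh4, he4⟩ | ⟨hh5, he5⟩ | ⟨hh6, he6⟩ | ⟨hh7, he7⟩
      · exact absurd h8 (by omega)
      · exact absurd he0 (by omega)
      · exact absurd he1 (by omega)
      · exact absurd he2 (by omega)
      · exact hh3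
      · exact absurd he4 (by omega)
      · exact absurd he5 (by omega)
      · exact absurd he6 (by omega)
      · exact absurd he7 (by omega)
    norm_num [chainG, hf0, hf1, hf2, ht, pvLABELS, PySem.List.pyGet?, PySem.List.pyIdx?]
    all_goals decide
  · -- r = 4
    have hf0 : pvG0 t = false := by
      cases h : pvG0 t with
      | false => rfl
      | true => exact absurd (hg0 h) (by omega)
    have hf1 : pvG1 t = false := by
      cases h : pvG1 t with
      | false => rfl
      | true => exact absurd (hg1 h) (by omega)
    have hf2 : pvG2 t = false := by
      cases h : pvG2 t with
      | false => rfl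
      | true => exact absurd (hg2 h) (by omega)
    have hf3 : pvG3 t = false := by
      cases h : pvG3 t with
      | false => rfl
      | true => exact absurd (hg3 h) (by omega)
    have ht : pvG4 t = true := by
      rcases hex with h8 | ⟨hh0, he0⟩ | ⟨hh1, he1⟩ | ⟨hh2, he2⟩ | ⟨hh3, he3⟩ | ⟨hh4, he4⟩ | ⟨hh5, he5⟩ | ⟨hh6, he6⟩ | ⟨hh7, he7⟩
      · exact absurd h8 (by omega)
      · exact absurd he0 (by omega)
      · exact absurd he1 (by omega)
      · exact absurd he2 (by omega)
      · exact absurd he3 (by omega)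
      · exact hh4
      · exact absurd he5 (by omega)
      · exact absurd he6 (by omega)
      · exact absurd he7 (by omega)
    norm_num [chainG, hf0, hf1, hf2, hf3, ht, pvLABELS, PySem.List.pyGet?, PySem.List.pyIdx?]
    all_goals decide
  · -- r = 5
    have hf0 : pvG0 t = false := by
      cases h : pvG0 t with
      | false => rfl
      | true => exact absurd (hg0 h) (by omega)
    have hf1 : pvG1 t = false := by
      cases h : pvG1 t with
      | false => rfl
      | true => exact absurd (hg1 h) (by omega)
    have hf2 : pvG2 t = false := by
      cases h : pvG2 t with
      | false => rfl
      | true => exact absurd (hg2 h) (by omega)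
    have hf3 : pvG3 t = false := by
      cases h : pvG3 t with
      | false => rfl
      | true => exact absurd (hg3 h) (by omega)
    have hf4 : pvG4 t = false := by
      cases h : pvG4 t with
      | false => rfl
      | true => exact absurd (hg4 h) (by omega)
    have ht : pvG5 t = true := by
      rcases hex with h8 | ⟨hh0, he0⟩ | ⟨hh1, he1⟩ | ⟨hh2, he2⟩ | ⟨hh3, he3⟩ | ⟨hh4, he4⟩ | ⟨hh5, he5⟩ | ⟨hh6, he6⟩ | ⟨hh7, he7⟩
      · exact absurd h8 (by omega)
      · exact absurd he0 (by omega)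
      · exact absurd he1 (by omega)
      · exact absurd he2 (by omega)
      · exact absurd he3 (by omega)
      · exact absurd he4 (by omega)
      · exact hh5
      · exact absurd he6 (by omega)
      · exact absurd he7 (by omega)
    norm_num [chainG, hf0, hf1, hf2, hf3, hf4, ht, pvLABELS, PySem.List.pyGet?, PySem.List.pyIdx?]
    all_goals decide
  · -- r = 6
    have hf0 : pvG0 t = false := by
      cases h : pvG0 t with
      | false => rfl
      | true => exact absurd (hg0 h) (by omega)
    have hf1 : pvG1 t = false := by
      cases h : pvG1 t with
      | false => rfl
      | true => exact absurd (hg1 h) (by omega)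
    have hf2 : pvG2 t = false := by
      cases h : pvG2 t with
      | false => rfl
      | true => exact absurd (hg2 h) (by omega)
    have hf3 : pvG3 t = false := by
      cases h : pvG3 t with
      | false => rfl
      | true => exact absurd (hg3 h) (by omega)
    have hf4 : pvG4 t = false := by
      cases h : pvG4 t with
      | false => rfl
      | true => exact absurd (hg4 h) (by omega)
    have hf5 : pvG5 t = false := by
      cases h : pvG5 t with
      | false => rfl
      | true => exact absurd (hg5 h) (by omega)
    have ht : pvG6 t = true := by
      rcases hex with h8 | ⟨hh0, he0⟩ | ⟨hh1, he1⟩ | ⟨hh2, he2⟩ | ⟨hh3, he3⟩ | ⟨hh4, he4⟩ | ⟨hh5, he5⟩ | ⟨hh6, he6⟩ | ⟨hh7, he7⟩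
      · exact absurd h8 (by omega)
      · exact absurd he0 (by omega)
      · exact absurd he1 (by omega)
      · exact absurd he2 (by omega)
      · exact absurd he3 (by omega)
      · exact absurd he4 (by omega)
      · exact absurd he5 (by omega)
      · exact hh6
      · exact absurd he7 (by omega)
    norm_num [chainG, hf0, hf1, hf2, hf3, hf4, hf5, ht, pvLABELS, PySem.List.pyGet?, PySem.List.pyIdx?]
    all_goals decide
  · -- r = 7
    have hf0 : pvG0 t = false := by
      cases h : pvG0 t with
      | false => rfl
      | true => exact absurd (hg0 h) (by omega)
    have hf1 : pvG1 t = false := by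
      cases h : pvG1 t with
      | false => rfl
      | true => exact absurd (hg1 h) (by omega)
    have hf2 : pvG2 t = false := by
      cases h : pvG2 t with
      | false => rfl
      | true => exact absurd (hg2 h) (by omega)
    have hf3 : pvG3 t = false := by
      cases h : pvG3 t with
      | false => rfl
      | true => exact absurd (hg3 h) (by omega)
    have hf4 : pvG4 t = false := by
      cases h : pvG4 t with
      | false => rfl
      | true => exact absurd (hg4 h) (by omega)
    have hf5 : pvG5 t = false := by
      cases h : pvG5 t with
      | false => rfl
      | true => exact absurd (hg5 h) (by omega)
    have hf6 : pvG6 t = false := by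
      cases h : pvG6 t with
      | false => rfl
      | true => exact absurd (hg6 h) (by omega)
    have ht : pvG7 t = true := by
      rcases hex with h8 | ⟨hh0, he0⟩ | ⟨hh1, he1⟩ | ⟨hh2, he2⟩ | ⟨hh3, he3⟩ | ⟨hh4, he4⟩ | ⟨hh5, he5⟩ | ⟨hh6, he6⟩ | ⟨hh7, he7⟩
      · exact absurd h8 (by omega)
      · exact absurd he0 (by omega)
      · exact absurd he1 (by omega)
      · exact absurd he2 (by omega)
      · exact absurd he3 (by omega)
      · exact absurd he4 (by omega)
      · exact absurd he5 (by omega)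
      · exact absurd he6 (by omega)
      · exact hh7
    norm_num [chainG, hf0, hf1, hf2, hf3, hf4, hf5, hf6, ht, pvLABELS, PySem.List.pyGet?, PySem.List.pyIdx?]
    all_goals decide
  · -- r = 8
    have hf0 : pvG0 t = false := by
      cases h : pvG0 t with
      | false => rfl
      | true => exact absurd (hg0 h) (by omega)
    have hf1 : pvG1 t = false := by
      cases h : pvG1 t with
      | false => rfl
      | true => exact absurd (hg1 h) (by omega)
    have hf2 : pvG2 t = false := by
      cases h : pvG2 t with
      | false => rfl
      | true => exact absurd (hg2 h) (by omega)
    have hf3 : pvG3 t = false := by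
      cases h : pvG3 t with
      | false => rfl
      | true => exact absurd (hg3 h) (by omega)
    have hf4 : pvG4 t = false := by
      cases h : pvG4 t with
      | false => rfl
      | true => exact absurd (hg4 h) (by omega)
    have hf5 : pvG5 t = false := by
      cases h : pvG5 t with
      | false => rfl
      | true => exact absurd (hg5 h) (by omega)
    have hf6 : pvG6 t = false := by
      cases h : pvG6 t with
      | false => rfl
      | true => exact absurd (hg6 h) (by omega)
    have hf7 : pvG7 t = false := by
      cases h : pvG7 t with
      | false => rfl
      | true => exact absurd (hg7 h) (by omega)
    norm_num [chainG, hf0, hf1, hf2, hf3, hf4, hf5, hf6, hf7]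

lemma pvMain (category : String) : categorize_fare_rule_py category = categorize_fare_rule_py_alt category := by
  by_cases hc : category = ""
  · subst hc; decide
  · have hB : categorize_fare_rule_py_alt category
        = (if pvOuter ((PySem.Str.lower category).toList)
              (PySem.List.pyRange 0 (((PySem.Str.lower category).toList).length : Int) 1) 8 < 8 then
            (PySem.List.pyGet? pvLABELS
              (pvOuter ((PySem.Str.lower category).toList)
                (PySem.List.pyRange 0 (((PySem.Str.lower category).toList).length : Int) 1) 8)).getD "general"
          else "general") := rfl
    have hA : categorize_fare_rule_py category
        = chainG (pvG0 ((PySem.Str.lower category).toList)) (pvG1 ((PySem.Str.lower category).toList))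
            (pvG2 ((PySem.Str.lower category).toList)) (pvG3 ((PySem.Str.lower category).toList))
            (pvG4 ((PySem.Str.lower category).toList)) (pvG5 ((PySem.Str.lower category).toList))
            (pvG6 ((PySem.Str.lower category).toList)) (pvG7 ((PySem.Str.lower category).toList)) := by
      simp only [categorize_fare_rule_py, if_neg hc, chainG, pvG0, pvG1, pvG2, pvG3, pvG4, pvG5, pvG6, pvG7,
        PySem.Str.isIn_eq]
      rfl
    rw [hA, hB]
    obtain ⟨h1, h2, h3⟩ := pvOuter_spec ((PySem.Str.lower category).toList)
      (PySem.List.pyRange 0 (((PySem.Str.lower category).toList).length : Int) 1) 8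
    have hne : ∀ kv ∈ pvPRI, (kv.1 : String).toList ≠ [] := by
      intro kv hm; fin_cases hm <;> decide
    have H2' : ∀ (kw : String) (p : Int), (kw, p) ∈ pvPRI →
        PySem.Chars.isIn kw.toList ((PySem.Str.lower category).toList) = true →
        pvOuter ((PySem.Str.lower category).toList)
          (PySem.List.pyRange 0 (((PySem.Str.lower category).toList).length : Int) 1) 8 ≤ p := by
      intro kw p hm hin
      exact h2 (kw, p) hm ((pvSw_iff _ kw.toList (hne (kw, p) hm)).mpr hin)
    have H3' : pvOuter ((PySem.Str.lower category).toList)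
          (PySem.List.pyRange 0 (((PySem.Str.lower category).toList).length : Int) 1) 8 = 8 ∨
        ∃ (kw : String) (p : Int), (kw, p) ∈ pvPRI ∧
          PySem.Chars.isIn kw.toList ((PySem.Str.lower category).toList) = true ∧
          pvOuter ((PySem.Str.lower category).toList)
            (PySem.List.pyRange 0 (((PySem.Str.lower category).toList).length : Int) 1) 8 = p := by
      rcases h3 with h | ⟨kv, hm, hex, hv⟩
      · exact Or.inl h
      · exact Or.inr ⟨kv.1, kv.2, by simpa using hm,
          (pvSw_iff _ kv.1.toList (hne kv hm)).mp hex, hv⟩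
    refine pvChain _ _ ?_ ?_ ?_ ?_ ?_ ?_ ?_ ?_ ?_
    · intro h
      rcases List.any_eq_true.mp h with ⟨w, hw, hmw⟩
      fin_cases hw
      · exact H2' "eligibility" 0 (by decide) hmw
      · exact H2' "passenger" 0 (by decide) hmw
    · intro h
      rcases List.any_eq_true.mp h with ⟨w, hw, hmw⟩
      fin_cases hw
      · exact H2' "day" 1 (by decide) hmw
      · exact H2' "time" 1 (by decide) hmw
      · exact H2' "seasonal" 1 (by decide) hmw
    · intro h
      rcases List.any_eq_true.mp h with ⟨w, hw, hmw⟩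
      fin_cases hw
      · exact H2' "advance" 2 (by decide) hmw
      · exact H2' "purchase" 2 (by decide) hmw
      · exact H2' "payment" 2 (by decide) hmw
    · intro h
      rcases List.any_eq_true.mp h with ⟨w, hw, hmw⟩
      fin_cases hw
      · exact H2' "stay" 3 (by decide) hmw
      · exact H2' "duration" 3 (by decide) hmw
      · exact H2' "minimum" 3 (by decide) hmw
      · exact H2' "maximum" 3 (by decide) hmw
    · intro h
      rcases List.any_eq_true.mp h with ⟨w, hw, hmw⟩
      fin_cases hw
      · exact H2' "change" 4 (by decide) hmw
      · exact H2' "modification" 4 (by decide) hmw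
      · exact H2' "reissue" 4 (by decide) hmw
    · intro h
      rcases List.any_eq_true.mp h with ⟨w, hw, hmw⟩
      fin_cases hw
      · exact H2' "refund" 5 (by decide) hmw
      · exact H2' "cancel" 5 (by decide) hmw
      · exact H2' "void" 5 (by decide) hmw
    · intro h
      rcases List.any_eq_true.mp h with ⟨w, hw, hmw⟩
      fin_cases hw
      · exact H2' "baggage" 6 (by decide) hmw
      · exact H2' "luggage" 6 (by decide) hmw
    · intro h
      rcases List.any_eq_true.mp h with ⟨w, hw, hmw⟩
      fin_cases hw
      · exact H2' "penalty" 7 (by decide) hmw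
      · exact H2' "fee" 7 (by decide) hmw
      · exact H2' "charge" 7 (by decide) hmw
    · rcases H3' with h | ⟨kw, p, hm, hin, hrp⟩
      · exact Or.inl h
      · simp only [pvPRI, List.mem_cons, List.not_mem_nil, or_false, Prod.mk.injEq] at hm
        rcases hm with ⟨rfl, rfl⟩ | ⟨rfl, rfl⟩ | ⟨rfl, rfl⟩ | ⟨rfl, rfl⟩ | ⟨rfl, rfl⟩ | ⟨rfl, rfl⟩ | ⟨rfl, rfl⟩ | ⟨rfl, rfl⟩ | ⟨rfl, rfl⟩ | ⟨rfl, rfl⟩ | ⟨rfl, rfl⟩ | ⟨rfl, rfl⟩ | ⟨rfl, rfl⟩ | ⟨rfl, rfl⟩ | ⟨rfl, rfl⟩ | ⟨rfl, rfl⟩ | ⟨rfl, rfl⟩ | ⟨rfl, rfl⟩ | ⟨rfl, rfl⟩ | ⟨rfl, rfl⟩ | ⟨rfl, rfl⟩ | ⟨rfl, rfl⟩ | ⟨rfl, rfl⟩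
        · exact Or.inr (Or.inl ⟨List.any_eq_true.mpr ⟨"eligibility", by simp, hin⟩, hrp⟩)
        · exact Or.inr (Or.inl ⟨List.any_eq_true.mpr ⟨"passenger", by simp, hin⟩, hrp⟩)
        · exact Or.inr (Or.inr (Or.inl ⟨List.any_eq_true.mpr ⟨"day", by simp, hin⟩, hrp⟩))
        · exact Or.inr (Or.inr (Or.inl ⟨List.any_eq_true.mpr ⟨"time", by simp, hin⟩, hrp⟩))
        · exact Or.inr (Or.inr (Or.inl ⟨List.any_eq_true.mpr ⟨"seasonal", by simp, hin⟩, hrp⟩))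
        · exact Or.inr (Or.inr (Or.inr (Or.inl ⟨List.any_eq_true.mpr ⟨"advance", by simp, hin⟩, hrp⟩)))
        · exact Or.inr (Or.inr (Or.inr (Or.inl ⟨List.any_eq_true.mpr ⟨"purchase", by simp, hin⟩, hrp⟩)))
        · exact Or.inr (Or.inr (Or.inr (Or.inl ⟨List.any_eq_true.mpr ⟨"payment", by simp, hin⟩, hrp⟩)))
        · exact Or.inr (Or.inr (Or.inr (Or.inr (Or.inl ⟨List.any_eq_true.mpr ⟨"stay", by simp, hin⟩, hrp⟩))))
        · exact Or.inr (Or.inr (Or.inr (Or.inr (Or.inl ⟨List.any_eq_true.mpr ⟨"duration", by simp, hin⟩, hrp⟩))))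
        · exact Or.inr (Or.inr (Or.inr (Or.inr (Or.inl ⟨List.any_eq_true.mpr ⟨"minimum", by simp, hin⟩, hrp⟩))))
        · exact Or.inr (Or.inr (Or.inr (Or.inr (Or.inl ⟨List.any_eq_true.mpr ⟨"maximum", by simp, hin⟩, hrp⟩))))
        · exact Or.inr (Or.inr (Or.inr (Or.inr (Or.inr (Or.inl ⟨List.any_eq_true.mpr ⟨"change", by simp, hin⟩, hrp⟩)))))
        · exact Or.inr (Or.inr (Or.inr (Or.inr (Or.inr (Or.inl ⟨List.any_eq_true.mpr ⟨"modification", by simp, hin⟩, hrp⟩)))))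
        · exact Or.inr (Or.inr (Or.inr (Or.inr (Or.inr (Or.inl ⟨List.any_eq_true.mpr ⟨"reissue", by simp, hin⟩, hrp⟩)))))
        · exact Or.inr (Or.inr (Or.inr (Or.inr (Or.inr (Or.inr (Or.inl ⟨List.any_eq_true.mpr ⟨"refund", by simp, hin⟩, hrp⟩))))))
        · exact Or.inr (Or.inr (Or.inr (Or.inr (Or.inr (Or.inr (Or.inl ⟨List.any_eq_true.mpr ⟨"cancel", by simp, hin⟩, hrp⟩))))))
        · exact Or.inr (Or.inr (Or.inr (Or.inr (Or.inr (Or.inr (Or.inl ⟨List.any_eq_true.mpr ⟨"void", by simp, hin⟩, hrp⟩))))))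
        · exact Or.inr (Or.inr (Or.inr (Or.inr (Or.inr (Or.inr (Or.inr (Or.inl ⟨List.any_eq_true.mpr ⟨"baggage", by simp, hin⟩, hrp⟩)))))))
        · exact Or.inr (Or.inr (Or.inr (Or.inr (Or.inr (Or.inr (Or.inr (Or.inl ⟨List.any_eq_true.mpr ⟨"luggage", by simp, hin⟩, hrp⟩)))))))
        · exact Or.inr (Or.inr (Or.inr (Or.inr (Or.inr (Or.inr (Or.inr (Or.inr ⟨List.any_eq_true.mpr ⟨"penalty", by simp, hin⟩, hrp⟩)))))))
        · exact Or.inr (Or.inr (Or.inr (Or.inr (Or.inr (Or.inr (Or.inr (Or.inr ⟨List.any_eq_true.mpr ⟨"fee", by simp, hin⟩, hrp⟩)))))))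
        · exact Or.inr (Or.inr (Or.inr (Or.inr (Or.inr (Or.inr (Or.inr (Or.inr ⟨List.any_eq_true.mpr ⟨"charge", by simp, hin⟩, hrp⟩)))))))

-- ===== VERDICT (by name: the statement is the Claim_ definition above) =====
theorem categorize_fare_rule_py_spec : Claim_equal_categorize_fare_rule_py := by
  intro category _
  unfold Spec_categorize_fare_rule_py
  exact pvMain category
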